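-- pv_equiv track=rewrite | github.com/CoodingPenguin/algorithm-c-sharp | boj/2231_분해합_1.py | smallest_constructor
-- ===== SOURCE A (Python) =====
-- def smallest_constructor(n):
--     length = len(str(n))
--     if length == 1:
--         return 0
--     for i in range(9*(10**(length-2)), n):
--         decom = i + sum(map(int, list(str(i))))
--         if decom == n:
--             return i
--     return 0
-- ===== SOURCE B (Python) =====
-- def digit_sum(m):
--     d = 0
--     while m:
--         d += m % 10
--         m //= 10
--     return d
--
-- def smallest_constructor(n):
--     width = 1
--     t = n
--     while t >= 10:
--         t //= 10
--         width += 1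
--     for i in range(max(1, n - 9 * width), n):
--         if i + digit_sum(i) == n:
--             return i
--     return 0
-- ===== Notes on version B (the rewrite author's own statement) =====
-- stated objective: faster
-- what changed: B scans only the window [max(1, n-9*width), n) of at most 9*width candidates (any i with i+digitsum(i)=n must lie there) and computes widths and digit sums arithmetically instead of converting every candidate to a string, replacing A's scan of almost the whole interval [9*10^(len-2), n).
-- intended difference: On the finitely many small n (all below 128, e.g. n=2 or n=100) whose smallest generator i with i+digitsum(i)=n lies below A's scan start 9*10^(len(n)-2), A returns 0 while B returns that generator, which is the intended answer to the decomposition-sum problem. — e.g. on smallest_constructor(2): A returns 0, B returns 1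
import Mathlib
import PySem

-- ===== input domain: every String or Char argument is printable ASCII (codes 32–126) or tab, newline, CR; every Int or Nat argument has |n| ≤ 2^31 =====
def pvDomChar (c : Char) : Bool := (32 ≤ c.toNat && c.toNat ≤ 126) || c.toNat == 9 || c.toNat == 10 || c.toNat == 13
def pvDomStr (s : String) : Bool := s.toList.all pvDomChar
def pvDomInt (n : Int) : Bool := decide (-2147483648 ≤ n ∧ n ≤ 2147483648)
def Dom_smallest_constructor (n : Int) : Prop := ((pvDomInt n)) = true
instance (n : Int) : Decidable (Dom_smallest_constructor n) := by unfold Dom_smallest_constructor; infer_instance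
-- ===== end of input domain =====

-- B scans only the window [max(1, n-9*width), n) with arithmetic digit sums instead of A's scan of
-- [9*10^(len-2), n) with per-candidate string conversion; on the finitely many small n whose generator
-- lies below A's scan start, A returns 0 and B returns the generator (see D_smallest_constructor).

-- ===== PORT A =====
-- sum(map(int, list(str(i)))); the `.getD 0` is unreachable: for every i this is applied to (i ≥ 9),
-- each character of str(i) is a decimal digit, so int(...) never raises
def pyDigitSumA (i : Int) : Int :=
  ((PySem.Int.toChars i).map (fun c => (PySem.Int.ofChars? [c]).getD 0)).sum

-- the for-loop of A with its early return
def loopA (n : Int) : List Int → Int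
  | [] => 0
  | i :: rest => if i + pyDigitSumA i = n then i else loopA n rest

def smallest_constructor (n : Int) : Int :=
  let length : Int := PySem.Str.len (PySem.Int.toStr n)
  if length = 1 then 0
  else
    -- 10**(length-2): length ≥ 2 in this branch, so `.toNat` is exact
    loopA n (PySem.List.pyRange (9 * 10 ^ (length - 2).toNat) n 1)

-- ===== PORT B =====
-- while m: d += m % 10; m //= 10   (fuel m.toNat totalises the loop; it bounds the iteration count
-- for every m ≥ 0 this is called on)
def pyDigitSumB : Nat → Int → Int → Int
  | 0, _, d => d
  | fuel + 1, m, d =>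
      if m = 0 then d else pyDigitSumB fuel (PySem.Int.floordiv m 10) (d + PySem.Int.mod m 10)

-- while t >= 10: t //= 10; width += 1   (fuel t.toNat bounds the iteration count)
def pyWidthLoop : Nat → Int → Int → Int
  | 0, _, w => w
  | fuel + 1, t, w => if 10 ≤ t then pyWidthLoop fuel (PySem.Int.floordiv t 10) (w + 1) else w

-- the for-loop of B with its early return
def loopB (n : Int) : List Int → Int
  | [] => 0
  | i :: rest => if i + pyDigitSumB i.toNat i 0 = n then i else loopB n rest

def smallest_constructor_alt (n : Int) : Int :=
  let width : Int := pyWidthLoop n.toNat n 1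
  loopB n (PySem.List.pyRange (max 1 (n - 9 * width)) n 1)

-- ===== PRECONDITION & SPEC =====
-- (the candidate window may start at n-90: on the 32-bit domain a digit sum is below 90,
-- so smaller candidates never satisfy i + digitsum(i) = n)
-- On the finitely many small n (all below 128, e.g. n=2 or n=100) that have a generator i with
-- i+digitsum(i)=n below A's scan start 9*10^(len(n)-2), A returns 0 while B returns the smallest
-- such generator, which is the intended answer to the decomposition-sum problem.
def D_smallest_constructor (n : Int) : Prop :=
  1 ≤ n ∧ ∃ i ∈ Finset.Ico (n.toNat - 90) (9 * 10 ^ ((Nat.digits 10 n.toNat).length - 2)),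
    (i : Int) + ((Nat.digits 10 i).sum : Int) = n
instance (n : Int) : Decidable (D_smallest_constructor n) := by
  unfold D_smallest_constructor; infer_instance

def Spec_smallest_constructor (n : Int) (out : Int) : Prop :=
  ¬ D_smallest_constructor n → out = smallest_constructor_alt n
instance (n : Int) (out : Int) : Decidable (Spec_smallest_constructor n out) := by
  unfold Spec_smallest_constructor; infer_instance

def pvDiffWitness_smallest_constructor : Int := 2
def pvDiffWitnessOut_smallest_constructor : Int × Int := (0, 1)

-- ===== CLAIM =====
def Claim_unchanged_smallest_constructor : Prop :=
  ∀ (n : Int), Dom_smallest_constructor n → Spec_smallest_constructor n (smallest_constructor n)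
def Claim_changed_smallest_constructor : Prop :=
  Dom_smallest_constructor (pvDiffWitness_smallest_constructor) ∧
  D_smallest_constructor (pvDiffWitness_smallest_constructor) ∧
  smallest_constructor (pvDiffWitness_smallest_constructor) = pvDiffWitnessOut_smallest_constructor.1 ∧
  smallest_constructor_alt (pvDiffWitness_smallest_constructor) = pvDiffWitnessOut_smallest_constructor.2 ∧
  pvDiffWitnessOut_smallest_constructor.1 ≠ pvDiffWitnessOut_smallest_constructor.2
def Claim_exact_smallest_constructor : Prop :=
  ∀ (n : Int), Dom_smallest_constructor n → D_smallest_constructor n →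
    smallest_constructor n ≠ smallest_constructor_alt n

-- ===== LEMMAS AND PROOFS =====

def digS (m : Nat) : Int := ((Nat.digits 10 m).sum : Int)
def digL (m : Nat) : Nat := (Nat.digits 10 m).length
def pvFind (n a : Int) : Int := loopB n (PySem.List.pyRange a n 1)

lemma lt_pow10_self (m : Nat) : m < 10 ^ m := Nat.lt_pow_self (by norm_num)

lemma lt_pow10_succ_self (m : Nat) : m < 10 ^ (m + 1) :=
  lt_of_lt_of_le (lt_pow10_self m) (Nat.pow_le_pow_right (by norm_num) (by omega))

lemma digL_le_iff {m k : Nat} : digL m ≤ k ↔ m < 10 ^ k :=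
  Nat.digits_length_le_iff (by norm_num) m

lemma digL_pos {m : Nat} (h : 1 ≤ m) : 1 ≤ digL m := by
  by_contra hc
  have h2 : m < 10 ^ 0 := digL_le_iff.mp (by omega)
  simp at h2; omega

lemma digL_eq_one {m : Nat} (h1 : 1 ≤ m) (h2 : m < 10) : digL m = 1 :=
  le_antisymm (digL_le_iff.mpr (by simpa using h2)) (digL_pos h1)

lemma digL_mono {i j : Nat} (h : i ≤ j) : digL i ≤ digL j :=
  digL_le_iff.mpr (lt_of_le_of_lt h (Nat.lt_base_pow_length_digits (by norm_num)))

lemma digL_def {m : Nat} (h : 1 ≤ m) : digL m = digL (m / 10) + 1 := by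
  unfold digL
  rw [Nat.digits_def' (by norm_num : 1 < 10) (by omega)]
  simp

lemma digS_nonneg (m : Nat) : 0 ≤ digS m := by unfold digS; exact Int.natCast_nonneg _

lemma digS_def {m : Nat} (h : 1 ≤ m) : digS m = ((m % 10 : Nat) : Int) + digS (m / 10) := by
  unfold digS
  rw [Nat.digits_def' (by norm_num : 1 < 10) (by omega)]
  push_cast [List.sum_cons]
  ring

lemma digS_pos : ∀ m : Nat, 1 ≤ m → 1 ≤ digS m := by
  intro m
  induction m using Nat.strong_induction_on with
  | _ m ih =>
    intro h
    rw [digS_def h]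
    by_cases h10 : m < 10
    · have hm : m % 10 = m := Nat.mod_eq_of_lt h10
      have := digS_nonneg (m / 10)
      omega
    · have := ih (m / 10) (Nat.div_lt_self (by omega) (by norm_num)) (by omega)
      have hnn : (0 : Int) ≤ ((m % 10 : Nat) : Int) := Int.natCast_nonneg _
      omega

lemma digS_le (m : Nat) : digS m ≤ 9 * (digL m : Int) := by
  have h : (Nat.digits 10 m).sum ≤ (Nat.digits 10 m).length * 9 := by
    have := List.sum_le_card_nsmul (Nat.digits 10 m) 9
      (fun x hx => by have := Nat.digits_lt_base (by norm_num) hx; omega)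
    simpa [smul_eq_mul] using this
  unfold digS digL
  omega

-- str(n): `Nat.toDigits 10` is the reversed digit list rendered with `Nat.digitChar`
lemma toDigitsCore_eq : ∀ (f n : Nat) (acc : List Char), 0 < n → n < f →
    Nat.toDigitsCore 10 f n acc = ((Nat.digits 10 n).reverse.map Nat.digitChar) ++ acc := by
  intro f
  induction f with
  | zero => intro n acc h1 h2; omega
  | succ f ih =>
    intro n acc h1 h2
    rw [Nat.toDigitsCore]
    by_cases h10 : n / 10 = 0
    · have hn : n < 10 := by omega
      rw [Nat.digits_def' (by norm_num : 1 < 10) h1, h10]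
      simp [Nat.mod_eq_of_lt hn]
    · have hrec := ih (n / 10) (Nat.digitChar (n % 10) :: acc) (Nat.pos_of_ne_zero h10)
        (by have := Nat.div_lt_self h1 (by norm_num : 1 < 10); omega)
      rw [Nat.digits_def' (by norm_num : 1 < 10) h1, if_neg h10, hrec]
      simp

lemma toDigits10_eq {n : Nat} (h : 0 < n) :
    Nat.toDigits 10 n = (Nat.digits 10 n).reverse.map Nat.digitChar := by
  unfold Nat.toDigits
  rw [toDigitsCore_eq (n + 1) n [] h (by omega), List.append_nil]

lemma toChars_nonneg {n : Int} (h : 0 ≤ n) :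
    PySem.Int.toChars n = Nat.toDigits 10 n.toNat := by
  simp [PySem.Int.toChars, not_lt.mpr h]

lemma len_toChars {n : Int} (h : 1 ≤ n) :
    (PySem.Int.toChars n).length = digL n.toNat := by
  rw [toChars_nonneg (by omega), toDigits10_eq (by omega : 0 < n.toNat)]
  simp [digL]

lemma parse_digitChar {d : Nat} (h : d < 10) :
    (PySem.Int.ofChars? [Nat.digitChar d]).getD 0 = (d : Int) := by
  interval_cases d <;> decide

lemma pyDigitSumA_eq {i : Int} (h : 0 ≤ i) : pyDigitSumA i = digS i.toNat := by
  rcases eq_or_lt_of_le h with h0 | h1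
  · rw [← h0]
    have hA0 : pyDigitSumA 0 = 0 := by decide
    rw [hA0]
    simp [digS]
  · unfold pyDigitSumA
    rw [toChars_nonneg h, toDigits10_eq (by omega : 0 < i.toNat), List.map_map]
    rw [List.map_congr_left (fun d hd => by
      have hlt : d < 10 := Nat.digits_lt_base (by norm_num) (List.mem_reverse.mp hd)
      show ((fun c => (PySem.Int.ofChars? [c]).getD 0) ∘ Nat.digitChar) d = ((d : Nat) : Int)
      simpa using parse_digitChar hlt)]
    rw [List.map_reverse, List.sum_reverse]
    unfold digS
    exact (Nat.cast_list_sum _).symm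

lemma pyDigitSumB_eq : ∀ (f : Nat) (m d : Int), 0 ≤ m → m.toNat < 10 ^ f →
    pyDigitSumB f m d = d + digS m.toNat := by
  intro f
  induction f with
  | zero =>
    intro m d h1 h2
    have hm : m = 0 := by simp at h2; omega
    subst hm
    simp [pyDigitSumB, digS]
  | succ f ih =>
    intro m d h1 h2
    by_cases hm : m = 0
    · subst hm; simp [pyDigitSumB, digS]
    · have h1' : 1 ≤ m := by omega
      simp only [pyDigitSumB, if_neg hm]
      have hfd : PySem.Int.floordiv m 10 = ((m.toNat / 10 : Nat) : Int) := by
        conv_lhs => rw [show m = ((m.toNat : Nat) : Int) by omega]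
        exact_mod_cast PySem.Int.floordiv_natCast m.toNat 10
      have hmd : PySem.Int.mod m 10 = ((m.toNat % 10 : Nat) : Int) := by
        conv_lhs => rw [show m = ((m.toNat : Nat) : Int) by omega]
        exact_mod_cast PySem.Int.mod_natCast m.toNat 10
      rw [hfd, hmd, ih _ _ (by positivity) (by
        simp only [Int.toNat_natCast]
        rw [Nat.div_lt_iff_lt_mul (by norm_num : 0 < 10)]
        calc m.toNat < 10 ^ (f + 1) := h2
          _ = 10 ^ f * 10 := by ring)]
      rw [digS_def (by omega : 1 ≤ m.toNat)]
      simp only [Int.toNat_natCast]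
      ring

lemma pyWidthLoop_eq : ∀ (f : Nat) (t w : Int), 1 ≤ t → t.toNat < 10 ^ (f + 1) →
    pyWidthLoop f t w = w + (digL t.toNat : Int) - 1 := by
  intro f
  induction f with
  | zero =>
    intro t w h1 h2
    have ht : t < 10 := by simp at h2; omega
    simp only [pyWidthLoop]
    rw [digL_eq_one (by omega) (by omega)]
    simp
  | succ f ih =>
    intro t w h1 h2
    by_cases h10 : 10 ≤ t
    · simp only [pyWidthLoop, if_pos h10]
      have hfd : PySem.Int.floordiv t 10 = ((t.toNat / 10 : Nat) : Int) := by
        conv_lhs => rw [show t = ((t.toNat : Nat) : Int) by omega]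
        exact_mod_cast PySem.Int.floordiv_natCast t.toNat 10
      rw [hfd, ih _ _ (by omega) (by
          simp only [Int.toNat_natCast]
          rw [Nat.div_lt_iff_lt_mul (by norm_num : 0 < 10)]
          calc t.toNat < 10 ^ (f + 1 + 1) := h2
            _ = 10 ^ (f + 1) * 10 := by ring)]
      rw [digL_def (by omega : 1 ≤ t.toNat)]
      simp only [Int.toNat_natCast]
      push_cast
      ring
    · simp only [pyWidthLoop, if_neg h10]
      rw [digL_eq_one (by omega) (by omega)]
      simp

lemma digL_eq_raw (m : Nat) : (Nat.digits 10 m).length = digL m := rfl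

lemma lt_digL_iff {m k : Nat} : k < digL m ↔ 10 ^ k ≤ m :=
  Nat.lt_digits_length_iff (by norm_num) m

lemma D_match_iff (i : Nat) (n : Int) :
    ((i : Int) + ((Nat.digits 10 i).sum : Int) = n) ↔ ((i : Int) + digS ((i : Int)).toNat = n) := by
  simp [digS]

-- a match anywhere implies it is at least n - 9*digL n (digit sums are at most 9 per digit)
lemma match_ge {n i : Int} (h1 : 1 ≤ i) (h2 : i < n) (hm : i + digS i.toNat = n) :
    n - 9 * (digL n.toNat : Int) ≤ i := by
  have hmono : digL i.toNat ≤ digL n.toNat := digL_mono (by omega)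
  have hle := digS_le i.toNat
  have hcast : (digL i.toNat : Int) ≤ (digL n.toNat : Int) := by exact_mod_cast hmono
  omega

-- constructing a D_ witness from an Int generator below A's scan start
lemma D_intro {n i : Int} (hN : n ≤ 2147483648) (h1 : 1 ≤ i)
    (h2 : i < 9 * 10 ^ (digL n.toNat - 2))
    (hm : i + digS i.toNat = n) : D_smallest_constructor n := by
  have hpos := digS_pos i.toNat (by omega)
  have hin : i < n := by omega
  have hge := match_ge h1 hin hm
  have hL : digL n.toNat ≤ 10 := digL_le_iff.mpr (by omega)
  unfold D_smallest_constructor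
  simp only [digL_eq_raw]
  refine ⟨by omega, i.toNat, Finset.mem_Ico.mpr ⟨by omega, ?_⟩, ?_⟩
  · have hc : ((9 * 10 ^ (digL n.toNat - 2) : Nat) : Int) = 9 * 10 ^ (digL n.toNat - 2) := by
      push_cast; ring
    omega
  · rw [D_match_iff]
    simp only [Int.toNat_natCast]
    rw [show ((i.toNat : Nat) : Int) = i by omega]
    exact hm

-- the loops of A and B agree on lists of nonnegative candidates
lemma loopB_cons_eq (n i : Int) (l : List Int) (h : 0 ≤ i) :
    loopB n (i :: l) = if i + digS i.toNat = n then i else loopB n l := by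
  simp only [loopB, pyDigitSumB_eq i.toNat i 0 h (lt_pow10_self _), zero_add]

lemma loopA_eq_loopB (n : Int) (l : List Int) (h : ∀ i ∈ l, 0 ≤ i) :
    loopA n l = loopB n l := by
  induction l with
  | nil => rfl
  | cons a l ih =>
    have ha : 0 ≤ a := h a List.mem_cons_self
    rw [loopB_cons_eq n a l ha]
    simp only [loopA, pyDigitSumA_eq ha]
    split_ifs
    · rfl
    · exact ih (fun i hi => h i (List.mem_cons_of_mem _ hi))

lemma loopB_append_nomatch (n : Int) (l1 l2 : List Int)
    (h : ∀ i ∈ l1, 0 ≤ i ∧ i + digS i.toNat ≠ n) :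
    loopB n (l1 ++ l2) = loopB n l2 := by
  induction l1 with
  | nil => simp
  | cons a l ih =>
    obtain ⟨h0, hne⟩ := h a List.mem_cons_self
    rw [List.cons_append, loopB_cons_eq n a _ h0, if_neg hne]
    exact ih (fun i hi => h i (List.mem_cons_of_mem _ hi))

lemma find_skip {n a b : Int} (hab : a ≤ b) (hbn : b ≤ n) (h0 : 0 ≤ a)
    (h : ∀ i : Int, a ≤ i → i < b → i + digS i.toNat ≠ n) :
    pvFind n a = pvFind n b := by
  unfold pvFind
  rw [PySem.List.pyRange_one_append a b n hab hbn]
  exact loopB_append_nomatch n _ _ (fun i hi => by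
    have := PySem.List.mem_pyRange_one.mp hi
    exact ⟨by omega, h i this.1 this.2⟩)

lemma find_zero {n a : Int} (h0 : 0 ≤ a)
    (h : ∀ i : Int, a ≤ i → i < n → i + digS i.toNat ≠ n) :
    pvFind n a = 0 := by
  rcases (by omega : n ≤ a ∨ a < n) with hna | han
  · unfold pvFind
    rw [PySem.List.pyRange_one_eq_nil hna]
    rfl
  · rw [find_skip (le_of_lt han) (le_refl n) h0 h]
    unfold pvFind
    rw [PySem.List.pyRange_one_eq_nil (le_refl n)]
    rfl

lemma find_le_of_match (n : Int) : ∀ (k : Nat) (a x : Int), (n - a).toNat ≤ k → 0 ≤ a →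
    a ≤ x → x < n → x + digS x.toNat = n → a ≤ pvFind n a ∧ pvFind n a ≤ x := by
  intro k
  induction k with
  | zero => intro a x hk h0 hax hxn hm; omega
  | succ k ih =>
    intro a x hk h0 hax hxn hm
    have han : a < n := by omega
    unfold pvFind
    rw [PySem.List.pyRange_one_cons han, loopB_cons_eq n a _ h0]
    by_cases hmac : a + digS a.toNat = n
    · rw [if_pos hmac]; exact ⟨le_refl a, hax⟩
    · rw [if_neg hmac]
      have hax' : a + 1 ≤ x := by
        rcases eq_or_lt_of_le hax with he | hl
        · subst he; exact absurd hm hmac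
        · omega
      have hrec := ih (a + 1) x (by omega) (by omega) hax' hxn hm
      unfold pvFind at hrec
      exact ⟨by omega, hrec.2⟩

lemma find_zero_or_ge (n : Int) : ∀ (k : Nat) (a : Int), (n - a).toNat ≤ k → 0 ≤ a →
    pvFind n a = 0 ∨ a ≤ pvFind n a := by
  intro k
  induction k with
  | zero =>
    intro a hk h0
    left
    unfold pvFind
    rw [PySem.List.pyRange_one_eq_nil (by omega)]
    rfl
  | succ k ih =>
    intro a hk h0
    rcases (by omega : n ≤ a ∨ a < n) with hna | han
    · left
      unfold pvFind
      rw [PySem.List.pyRange_one_eq_nil hna]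
      rfl
    · unfold pvFind
      rw [PySem.List.pyRange_one_cons han, loopB_cons_eq n a _ h0]
      by_cases hmac : a + digS a.toNat = n
      · rw [if_pos hmac]; right; exact le_refl a
      · rw [if_neg hmac]
        rcases ih (a + 1) (by omega) (by omega) with h | h
        · left; unfold pvFind at h; exact h
        · right; unfold pvFind at h; omega

-- evaluating the ports
lemma A_len (n : Int) : PySem.Str.len (PySem.Int.toStr n) = ((PySem.Int.toChars n).length : Int) := by
  rw [PySem.Str.len_eq, PySem.Int.toList_toStr]

lemma A_eq {n : Int} (h : 10 ≤ n) :
    smallest_constructor n = pvFind n (9 * 10 ^ (digL n.toNat - 2)) := by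
  have hL2 : 2 ≤ digL n.toNat := by
    have h2 : 1 < digL n.toNat := lt_digL_iff.mpr (by rw [pow_one]; omega)
    omega
  have hlen : PySem.Str.len (PySem.Int.toStr n) = (digL n.toNat : Int) := by
    rw [A_len, len_toChars (by omega)]
  have hne : (digL n.toNat : Int) ≠ 1 := by omega
  simp only [smallest_constructor]
  rw [hlen, if_neg hne]
  rw [show ((digL n.toNat : Int) - 2).toNat = digL n.toNat - 2 by omega]
  unfold pvFind
  apply loopA_eq_loopB
  intro i hi
  have := (PySem.List.mem_pyRange_one.mp hi).1
  have hp : (0 : Int) < 10 ^ (digL n.toNat - 2) := by positivity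
  omega

lemma A_eq_small {n : Int} (h0 : 0 ≤ n) (h9 : n < 10) : smallest_constructor n = 0 := by
  have hlen : PySem.Str.len (PySem.Int.toStr n) = 1 := by
    rcases (by omega : n = 0 ∨ 1 ≤ n) with he | h1
    · subst he; rw [A_len]; decide
    · rw [A_len, len_toChars h1, digL_eq_one (by omega) (by omega)]
      simp
  simp only [smallest_constructor]
  rw [hlen, if_pos rfl]

lemma A_eq_neg {n : Int} (h : n < 0) : smallest_constructor n = 0 := by
  have hchars : PySem.Int.toChars n = '-' :: Nat.toDigits 10 n.natAbs := by
    simp [PySem.Int.toChars, h]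
  have hlen2 : 2 ≤ (PySem.Int.toChars n).length := by
    rw [hchars, toDigits10_eq (by omega : 0 < n.natAbs)]
    have hpos : 1 ≤ digL n.natAbs := digL_pos (by omega)
    unfold digL at hpos
    simp only [List.length_cons, List.length_map, List.length_reverse]
    omega
  have hne : ((PySem.Int.toChars n).length : Int) ≠ 1 := by omega
  simp only [smallest_constructor]
  rw [A_len, if_neg hne]
  rw [PySem.List.pyRange_one_eq_nil (by
    have hp : (0 : Int) < 10 ^ (((PySem.Int.toChars n).length : Int) - 2).toNat := by positivity
    omega)]
  rfl

lemma B_eq {n : Int} (h : 1 ≤ n) :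
    smallest_constructor_alt n = pvFind n (max 1 (n - 9 * (digL n.toNat : Int))) := by
  simp only [smallest_constructor_alt]
  rw [pyWidthLoop_eq n.toNat n 1 h (lt_pow10_succ_self _)]
  rw [show (1 : Int) + (digL n.toNat : Int) - 1 = (digL n.toNat : Int) by ring]
  rfl

lemma B_eq_nonpos {n : Int} (h : n ≤ 0) : smallest_constructor_alt n = 0 := by
  simp only [smallest_constructor_alt]
  rw [PySem.List.pyRange_one_eq_nil (by
    have h1 : (1 : Int) ≤ max 1 (n - 9 * pyWidthLoop n.toNat n 1) := le_max_left _ _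
    omega)]
  rfl

-- ===== VERDICT =====
theorem smallest_constructor_spec : Claim_unchanged_smallest_constructor := by
  unfold Claim_unchanged_smallest_constructor
  intro n hdom
  have hN : n ≤ 2147483648 := by
    unfold Dom_smallest_constructor pvDomInt at hdom
    exact (of_decide_eq_true hdom).2
  unfold Spec_smallest_constructor
  intro hnd
  rcases (by omega : n < 1 ∨ 1 ≤ n) with hn1 | hn1
  · -- n ≤ 0 : both loops run over an empty range
    rw [B_eq_nonpos (by omega)]
    rcases (by omega : 0 ≤ n ∨ n < 0) with h0 | h0
    · exact A_eq_small h0 (by omega)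
    · exact A_eq_neg h0
  · rcases (by omega : 10 ≤ n ∨ n < 10) with h10 | h10
    · -- main case: n ≥ 10
      rw [A_eq h10, B_eq (by omega)]
      have hL2 : 2 ≤ digL n.toNat := by
        have h2 : 1 < digL n.toNat := lt_digL_iff.mpr (by rw [pow_one]; omega)
        omega
      have hpow : (1 : Int) ≤ 10 ^ (digL n.toNat - 2) := one_le_pow₀ (by norm_num)
      have hs9 : (9 : Int) ≤ 9 * 10 ^ (digL n.toNat - 2) := by
        have h9 : (9 : Int) * 1 ≤ 9 * 10 ^ (digL n.toNat - 2) :=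
          mul_le_mul_of_nonneg_left hpow (by norm_num)
        omega
      have hsn : 9 * 10 ^ (digL n.toNat - 2) < n := by
        have h1 : (10 : ℕ) ^ (digL n.toNat - 1) ≤ n.toNat := lt_digL_iff.mp (by omega)
        have h1' : (10 : Int) ^ (digL n.toNat - 1) ≤ n := by
          have h1c : (((10 : ℕ) ^ (digL n.toNat - 1) : ℕ) : Int) ≤ ((n.toNat : ℕ) : Int) := by
            exact_mod_cast h1
          push_cast at h1c
          omega
        have hlt : (9 : Int) * 10 ^ (digL n.toNat - 2) < 10 * 10 ^ (digL n.toNat - 2) :=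
          mul_lt_mul_of_pos_right (by norm_num) (by positivity)
        have hpw : (10 : Int) * 10 ^ (digL n.toNat - 2) = 10 ^ (digL n.toNat - 1) := by
          rw [← pow_succ']
          congr 1
          omega
        omega
      have hnomatch : ∀ i : Int, 1 ≤ i → i < 9 * 10 ^ (digL n.toNat - 2) →
          i + digS i.toNat ≠ n := fun i hi1 his hmatch => hnd (D_intro hN hi1 his hmatch)
      have hlow : ∀ i : Int, 1 ≤ i → i < n - 9 * (digL n.toNat : Int) →
          i + digS i.toNat ≠ n := by
        intro i hi1 hi2 hm
        have := match_ge hi1 (by have := digS_nonneg i.toNat; omega) hm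
        omega
      rcases (by omega : max 1 (n - 9 * (digL n.toNat : Int)) ≤ 9 * 10 ^ (digL n.toNat - 2) ∨
          9 * 10 ^ (digL n.toNat - 2) < max 1 (n - 9 * (digL n.toNat : Int))) with hls | hsl
      · rw [find_skip hls (le_of_lt hsn) (by omega)
          (fun i hi1 hi2 => hnomatch i (by omega) hi2)]
      · have hlo_eq : max 1 (n - 9 * (digL n.toNat : Int)) = n - 9 * (digL n.toNat : Int) := by
          rcases max_choice 1 (n - 9 * (digL n.toNat : Int)) with hc | hc
          · omega
          · exact hc
        rw [find_skip (le_of_lt hsl) (by omega) (by omega : (0 : Int) ≤ 9 * 10 ^ (digL n.toNat - 2))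
          (fun i hi1 hi2 => hlow i (by omega) (by omega))]
    · -- 1 ≤ n ≤ 9 : A returns 0 on its one-digit early return; ¬D_ means B finds nothing
      rw [A_eq_small (by omega) h10, B_eq (by omega), digL_eq_one (by omega) (by omega),
        max_eq_left (by push_cast; omega : n - 9 * ((1 : Nat) : Int) ≤ 1)]
      symm
      apply find_zero (by norm_num)
      intro i hi1 hi2 hm
      apply hnd
      apply D_intro hN hi1 _ hm
      have h1 : digL n.toNat = 1 := digL_eq_one (by omega) (by omega)
      rw [h1]
      norm_num
      omega

theorem smallest_constructor_changed : Claim_changed_smallest_constructor := by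
  unfold Claim_changed_smallest_constructor
  have hd2 : Nat.digits 10 2 = [2] := by
    rw [Nat.digits_def' (by norm_num : 1 < 10) (by norm_num)]
    norm_num
  have hd1 : Nat.digits 10 1 = [1] := by
    rw [Nat.digits_def' (by norm_num : 1 < 10) (by norm_num)]
    norm_num
  refine ⟨by decide, ?_, ?_, by decide, by decide⟩
  · show D_smallest_constructor 2
    unfold D_smallest_constructor
    rw [show ((2 : Int).toNat) = 2 from rfl, hd2]
    refine ⟨by norm_num, 1, ?_, ?_⟩
    · decide
    · norm_num [hd1]
  · show smallest_constructor 2 = 0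
    exact A_eq_small (by norm_num) (by norm_num)

theorem smallest_constructor_tight : Claim_exact_smallest_constructor := by
  unfold Claim_exact_smallest_constructor
  intro n _ hD
  obtain ⟨hn1, i0, hmem, hmatch⟩ := hD
  rw [Finset.mem_Ico] at hmem
  have hmx : (i0 : Int) + digS ((i0 : Int)).toNat = n := (D_match_iff i0 n).mp hmatch
  have hx1 : (1 : Int) ≤ (i0 : Int) := by
    rcases Nat.eq_zero_or_pos i0 with h0 | h1
    · subst h0; simp [digS] at hmx; omega
    · exact_mod_cast h1
  have hxs : (i0 : Int) < 9 * 10 ^ (digL n.toNat - 2) := by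
    have h2 : (i0 : Int) < ((9 * 10 ^ ((Nat.digits 10 n.toNat).length - 2) : Nat) : Int) := by
      exact_mod_cast hmem.2
    have hc : ((9 * 10 ^ ((Nat.digits 10 n.toNat).length - 2) : Nat) : Int) =
        9 * 10 ^ (digL n.toNat - 2) := by
      rw [digL_eq_raw]; push_cast; ring
    omega
  have hxn : (i0 : Int) < n := by
    have h1 := digS_pos i0 (by exact_mod_cast hx1)
    have hmxN : (i0 : Int) + digS i0 = n := by simpa using hmx
    omega
  have hmx2 : (i0 : Int) + digS ((i0 : Int)).toNat = n := hmx
  rcases (by omega : n < 10 ∨ 10 ≤ n) with h10 | h10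
  · -- n ≤ 9 : A = 0 but B finds a generator ≥ 1
    rw [A_eq_small (by omega) h10, B_eq (by omega), digL_eq_one (by omega) (by omega),
      max_eq_left (by push_cast; omega : n - 9 * ((1 : Nat) : Int) ≤ 1)]
    have hB := find_le_of_match n (n - 1).toNat 1 (i0 : Int) (le_refl _) (by norm_num) hx1 hxn hmx2
    omega
  · -- n ≥ 10 : B's result is a generator below A's scan start; A's is 0 or at least its scan start
    rw [A_eq h10, B_eq (by omega)]
    have hge0 : n - 9 * (digL n.toNat : Int) ≤ (i0 : Int) := match_ge hx1 hxn hmx2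
    have hxlo : max 1 (n - 9 * (digL n.toNat : Int)) ≤ (i0 : Int) := max_le hx1 hge0
    have hlo1 : (1 : Int) ≤ max 1 (n - 9 * (digL n.toNat : Int)) := le_max_left _ _
    have hB := find_le_of_match n (n - max 1 (n - 9 * (digL n.toNat : Int))).toNat
      (max 1 (n - 9 * (digL n.toNat : Int))) (i0 : Int) (le_refl _)
      (le_trans zero_le_one hlo1) hxlo hxn hmx2
    have hp : (0 : Int) < 10 ^ (digL n.toNat - 2) := by positivity
    have hA := find_zero_or_ge n (n - 9 * 10 ^ (digL n.toNat - 2)).toNat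
      (9 * 10 ^ (digL n.toNat - 2)) (le_refl _) (by omega)
    rcases hA with hA | hA <;> omega
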